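-- pv_equiv track=rewrite | github.com/BlocUnited-LLC/mozaiks-ai | workflows/Generator/tools/mermaid_sequence_diagram.py | _generate_fallback_diagram
-- ===== SOURCE A (Python) =====
-- from typing import Annotated, Any, Dict, List, Optional, Tuple
--
-- MANDATORY_PREFIX = "sequenceDiagram"
--
-- def _generate_fallback_diagram(legend: List[str], workflow_name: str) -> str:
--     """Generate a simple, guaranteed-valid Mermaid diagram from legend entries.
--
--     This is a fallback when the LLM-generated diagram has unfixable syntax errors.
--     Creates a basic linear flow: User -> P1 -> P2 -> ... -> User
--     """
--     if not legend:
--         return f"{MANDATORY_PREFIX}\n    participant User\n\n    User->>User: No phases defined"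
--
--     # Parse legend entries (format: "P1: Phase Name")
--     participants = []
--     for entry in legend:
--         parts = entry.split(":", 1)
--         if len(parts) == 2:
--             alias = parts[0].strip()
--             name = parts[1].strip()
--             participants.append((alias, name))
--
--     if not participants:
--         return f"{MANDATORY_PREFIX}\n    participant User\n\n    User->>User: Invalid legend format"
--
--     # Build diagram
--     lines = [MANDATORY_PREFIX, "    participant User"]
--
--     # Declare all participants
--     for alias, name in participants:
--         # Truncate name to 12 chars max for Mermaid compatibility
--         short_name = name if len(name) <= 12 else name[:12]
--         lines.append(f"    participant {alias} as {short_name}")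
--
--     # Add blank line after participants (Mermaid requirement)
--     lines.append("")
--
--     # Create simple linear flow
--     if len(participants) == 1:
--         alias, name = participants[0]
--         lines.append(f"    User->>{alias}: Start {workflow_name}")
--         lines.append(f"    {alias}->>User: Complete")
--     else:
--         # User -> P1
--         lines.append(f"    User->>{participants[0][0]}: Start {workflow_name}")
--
--         # P1 -> P2 -> P3 -> ...
--         for i in range(len(participants) - 1):
--             curr_alias = participants[i][0]
--             next_alias = participants[i + 1][0]
--             lines.append(f"    {curr_alias}->>{next_alias}: Continue")
--
--         # PN -> User
--         last_alias = participants[-1][0]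
--         lines.append(f"    {last_alias}->>User: Complete")
--
--     return "\n".join(lines)
-- ===== SOURCE B (Python) =====
-- MANDATORY_PREFIX = "sequenceDiagram"
--
-- def _generate_fallback_diagram(legend, workflow_name):
--     if not legend:
--         return f"{MANDATORY_PREFIX}\n    participant User\n\n    User->>User: No phases defined"
--     participants = [tuple(map(str.strip, e.split(":", 1))) for e in legend if ":" in e]
--     if not participants:
--         return f"{MANDATORY_PREFIX}\n    participant User\n\n    User->>User: Invalid legend format"
--     path = ["User"] + [a for a, _ in participants] + ["User"]
--     labels = [f"Start {workflow_name}"] + ["Continue"] * (len(path) - 3) + ["Complete"]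
--     lines = [MANDATORY_PREFIX, "    participant User"]
--     lines += [f"    participant {a} as {n[:12]}" for a, n in participants]
--     lines.append("")
--     lines += [f"    {s}->>{d}: {l}" for s, d, l in zip(path, path[1:], labels)]
--     return "\n".join(lines)
-- ===== Notes on version B (the rewrite author's own statement) =====
-- stated objective: simpler
-- what changed: B replaces A's append-driven parse loop by a filter+map comprehension and unifies A's two flow branches (len==1 special case vs an index loop over range(len-1) plus separate first/last appends) into one traversal of consecutive pairs of an explicit actor path ['User']+aliases+['User'] zipped with a Start/Continue/Complete label list.
import Mathlib
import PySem

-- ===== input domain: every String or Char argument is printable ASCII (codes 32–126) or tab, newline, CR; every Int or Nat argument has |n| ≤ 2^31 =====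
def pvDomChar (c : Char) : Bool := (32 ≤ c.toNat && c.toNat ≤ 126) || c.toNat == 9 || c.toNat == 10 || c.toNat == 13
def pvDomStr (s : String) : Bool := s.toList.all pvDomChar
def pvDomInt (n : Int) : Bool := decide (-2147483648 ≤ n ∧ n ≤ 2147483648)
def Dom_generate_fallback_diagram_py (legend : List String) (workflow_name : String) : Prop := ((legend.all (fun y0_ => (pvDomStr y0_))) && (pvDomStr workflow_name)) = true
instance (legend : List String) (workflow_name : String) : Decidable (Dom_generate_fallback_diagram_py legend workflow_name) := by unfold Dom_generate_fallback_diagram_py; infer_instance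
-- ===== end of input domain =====

-- B replaces A's two flow branches (len==1 vs len>1 with an index loop) by a single
-- walk over consecutive pairs of an explicit actor path User→P1→…→Pn→User zipped with
-- a label list; same output, simpler decomposition (objective: simpler).

-- ===== PORT A =====
def generate_fallback_diagram_py (legend : List String) (workflow_name : String) : String :=
  if legend == [] then
    "sequenceDiagram\n    participant User\n\n    User->>User: No phases defined"
  else
    let participants : List (String × String) := legend.foldl (fun acc entry =>
      let parts := (PySem.Str.splitMax? entry ":" 1).getD []
      if parts.length == 2 then
        acc ++ [(PySem.Str.strip (parts.getD 0 ""), PySem.Str.strip (parts.getD 1 ""))]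
      else acc) []
    if participants == [] then
      "sequenceDiagram\n    participant User\n\n    User->>User: Invalid legend format"
    else
      let lines := ["sequenceDiagram", "    participant User"]
      let lines := participants.foldl (fun ls p =>
        let short_name := if PySem.Str.len p.2 ≤ 12 then p.2 else PySem.Str.slice p.2 none (some 12)
        ls ++ ["    participant " ++ p.1 ++ " as " ++ short_name]) lines
      let lines := lines ++ [""]
      let lines :=
        if participants.length == 1 then
          let p := participants.getD 0 ("", "")
          (lines ++ ["    User->>" ++ p.1 ++ ": Start " ++ workflow_name])
            ++ ["    " ++ p.1 ++ "->>User: Complete"]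
        else
          let lines := lines ++ ["    User->>" ++ (PySem.List.pyGetD participants 0 ("", "")).1 ++ ": Start " ++ workflow_name]
          let lines := (PySem.List.pyRange 0 ((participants.length : Int) - 1) 1).foldl (fun ls i =>
            ls ++ ["    " ++ (PySem.List.pyGetD participants i ("", "")).1 ++ "->>" ++ (PySem.List.pyGetD participants (i + 1) ("", "")).1 ++ ": Continue"]) lines
          lines ++ ["    " ++ (PySem.List.pyGetD participants (-1) ("", "")).1 ++ "->>User: Complete"]
      PySem.Str.join "\n" lines

-- ===== PORT B =====
def generate_fallback_diagram_py_alt (legend : List String) (workflow_name : String) : String :=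
  if legend == [] then
    "sequenceDiagram\n    participant User\n\n    User->>User: No phases defined"
  else
    let participants : List (String × String) :=
      ((legend.map (fun e => (PySem.Str.splitMax? e ":" 1).getD [])).filter
        (fun p => p.length == 2)).map
        (fun p => (PySem.Str.strip (p.getD 0 ""), PySem.Str.strip (p.getD 1 "")))
    if participants == [] then
      "sequenceDiagram\n    participant User\n\n    User->>User: Invalid legend format"
    else
      let path := ["User"] ++ participants.map (·.1) ++ ["User"]
      let labels := ["Start " ++ workflow_name] ++ List.replicate (path.length - 3) "Continue" ++ ["Complete"]
      let lines := ["sequenceDiagram", "    participant User"]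
        ++ participants.map (fun p => "    participant " ++ p.1 ++ " as " ++ PySem.Str.slice p.2 none (some 12))
        ++ [""]
        ++ ((path.zip path.tail).zip labels).map (fun q => "    " ++ q.1.1 ++ "->>" ++ q.1.2 ++ ": " ++ q.2)
      PySem.Str.join "\n" lines

-- ===== PRECONDITION & SPEC =====
def Spec_generate_fallback_diagram_py (legend : List String) (workflow_name : String) (out : String) : Prop := out = generate_fallback_diagram_py_alt legend workflow_name
instance (legend : List String) (workflow_name : String) (out : String) : Decidable (Spec_generate_fallback_diagram_py legend workflow_name out) := by unfold Spec_generate_fallback_diagram_py; infer_instance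

-- ===== CLAIM (what is proved, stated in full; the proofs are below) =====
def Claim_equal_generate_fallback_diagram_py : Prop := ∀ (legend : List String) (workflow_name : String), Dom_generate_fallback_diagram_py legend workflow_name → Spec_generate_fallback_diagram_py legend workflow_name (generate_fallback_diagram_py legend workflow_name)

-- ===== LEMMAS AND PROOFS =====

-- consecutive-pair edges of a list (proof-side helper)
def pvContF {α β : Type} (f : α → α → β) : List α → List β
  | x :: y :: r => f x y :: pvContF f (y :: r)
  | _ => []

-- A's index loop over range(len-1), characterised as consecutive-pair edges
lemma pv_A_mid' : ∀ (tl : List (String × String)) (p : String × String),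
    (List.range tl.length).map
        (fun k => "    " ++ ((p :: tl).getD k ("", "")).1 ++ "->>"
          ++ ((p :: tl).getD (k + 1) ("", "")).1 ++ ": Continue")
      = pvContF (fun a b => "    " ++ a ++ "->>" ++ b ++ ": Continue") ((p :: tl).map (·.1))
  | [], _ => rfl
  | q :: r, p => by
      rw [List.length_cons, List.range_succ_eq_map, List.map_cons, List.map_map]
      simp only [Nat.succ_eq_add_one, List.getD_cons_succ, List.getD_cons_zero, Function.comp_def]
      simpa [pvContF] using pv_A_mid' r q

lemma pv_A_mid (p : String × String) (tl : List (String × String)) :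
    (PySem.List.pyRange 0 (((p :: tl).length : Int) - 1) 1).map
        (fun i => "    " ++ (PySem.List.pyGetD (p :: tl) i ("", "")).1 ++ "->>"
          ++ (PySem.List.pyGetD (p :: tl) (i + 1) ("", "")).1 ++ ": Continue")
      = pvContF (fun a b => "    " ++ a ++ "->>" ++ b ++ ": Continue") ((p :: tl).map (·.1)) := by
  rw [PySem.List.pyRange_one, List.map_map]
  have hlen : ((((p :: tl).length : Int)) - 1 - 0).toNat = tl.length := by
    simp
  rw [hlen]
  have hstep : ((fun i => "    " ++ (PySem.List.pyGetD (p :: tl) i ("", "")).1 ++ "->>"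
        ++ (PySem.List.pyGetD (p :: tl) (i + 1) ("", "")).1 ++ ": Continue") ∘ fun k : Nat => (0 : Int) + ↑k)
      = fun k : Nat => "    " ++ ((p :: tl).getD k ("", "")).1 ++ "->>"
          ++ ((p :: tl).getD (k + 1) ("", "")).1 ++ ": Continue" := by
    funext k
    simp only [Function.comp_apply, zero_add]
    rw [show ((k : Int) + 1) = ((k + 1 : Nat) : Int) by push_cast; ring]
    rw [PySem.List.pyGetD_natCast, PySem.List.pyGetD_natCast]
  rw [hstep]
  exact pv_A_mid' tl p

-- B's zip over the path tail, characterised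
lemma pv_zip_flow : ∀ (tl : List String) (a : String),
    ((((a :: tl) ++ ["User"]).zip (tl ++ ["User"])).zip
        (List.replicate tl.length "Continue" ++ ["Complete"])).map
      (fun q => "    " ++ q.1.1 ++ "->>" ++ q.1.2 ++ ": " ++ q.2)
      = pvContF (fun x y => "    " ++ x ++ "->>" ++ y ++ ": " ++ "Continue") (a :: tl)
        ++ ["    " ++ (a :: tl).getLastD "" ++ "->>" ++ "User" ++ ": " ++ "Complete"]
  | [], a => by simp [pvContF]
  | y :: r, a => by
      simpa [pvContF, List.replicate_succ] using pv_zip_flow r y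

-- literal re-association helpers for String append
lemma pvL_user (x : String) : x ++ "->>" ++ "User" = x ++ "->>User" := by
  rw [String.append_assoc]; rfl

lemma pvL_complete (x : String) : x ++ ": " ++ "Complete" = x ++ ": Complete" := by
  rw [String.append_assoc]; rfl

lemma pvL_continue (x : String) : x ++ ": " ++ "Continue" = x ++ ": Continue" := by
  rw [String.append_assoc]; rfl

lemma pvL_start (x : String) : x ++ ": " ++ "Start " = x ++ ": Start " := by
  rw [String.append_assoc]; rfl

lemma pvL_userComplete (x : String) : x ++ "->>User" ++ ": Complete" = x ++ "->>User: Complete" := by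
  rw [String.append_assoc]; rfl

lemma pv_last_fst : ∀ (tl : List (String × String)) (p : String × String) (h : p :: tl ≠ []),
    ((p :: tl).getLast h).1 = (p.1 :: tl.map (fun x => x.1)).getLastD ""
  | [], _, _ => rfl
  | q :: r, p, _ => by
      rw [List.getLast_cons (List.cons_ne_nil _ _), pv_last_fst r q (List.cons_ne_nil _ _)]
      simp only [List.map_cons, List.getLastD_cons]

-- name truncation: the conditional and the unconditional slice agree
lemma pv_short_name (s : String) :
    (if s.length ≤ 12 then s else PySem.Str.slice s none (some 12))
      = PySem.Str.slice s none (some 12) := by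
  split_ifs with hle
  · apply String.toList_inj.mp
    simp only [PySem.Str.toList_slice, PySem.Chars.slice_eq_listSlice]
    rw [PySem.List.slice_to _ (by norm_num : (0:Int) ≤ (12:Int))]
    rw [List.take_of_length_le]
    simpa using hle
  · rfl

theorem generate_fallback_diagram_py_spec : Claim_equal_generate_fallback_diagram_py := by
  intro legend wn _
  unfold Spec_generate_fallback_diagram_py
  unfold generate_fallback_diagram_py generate_fallback_diagram_py_alt
  by_cases hleg : legend = []
  · simp [hleg]
  · have hbe : (legend == []) = false := by simpa using hleg
    rw [hbe]
    simp only [Bool.false_eq_true, if_false]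
    have hparse :
        ((legend.map (fun e => (PySem.Str.splitMax? e ":" 1).getD [])).filter
            (fun p => p.length == 2)).map
          (fun p => (PySem.Str.strip (p.getD 0 ""), PySem.Str.strip (p.getD 1 "")))
        = (legend.filter (fun x => ((PySem.Str.splitMax? x ":" 1).getD []).length == 2)).map
            (fun x => (PySem.Str.strip (((PySem.Str.splitMax? x ":" 1).getD []).getD 0 ""),
                       PySem.Str.strip (((PySem.Str.splitMax? x ":" 1).getD []).getD 1 ""))) := by
      rw [List.filter_map, List.map_map]; rfl
    rw [hparse]
    simp only [PySem.List.foldl_append_if, List.nil_append]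
    generalize ((legend.filter (fun x => ((PySem.Str.splitMax? x ":" 1).getD []).length == 2)).map
            (fun x => (PySem.Str.strip (((PySem.Str.splitMax? x ":" 1).getD []).getD 0 ""),
                       PySem.Str.strip (((PySem.Str.splitMax? x ":" 1).getD []).getD 1 "")))) = P
    cases P with
    | nil => simp
    | cons p tl =>
      simp only [List.cons_ne_nil, beq_iff_eq]
      cases tl with
      | nil =>
        simp [pv_short_name, pvL_user, pvL_complete,
          pvL_start, pvL_userComplete, ← String.append_assoc]
      | cons q tl' =>
        rw [if_neg (show ¬((p :: q :: tl').length = 1) by simp)]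
        simp only [PySem.List.foldl_append_singleton_eq_map]
        rw [pv_A_mid]
        simp only [List.map_cons, List.cons_append, List.nil_append, List.tail_cons]
        rw [show ("User" :: p.1 :: q.1 :: (List.map (fun x => x.1) tl' ++ ["User"])).length - 3
              = (q.1 :: List.map (fun x => x.1) tl').length from by simp]
        rw [List.zip_cons_cons, List.zip_cons_cons, List.map_cons]
        have hflow := pv_zip_flow (q.1 :: List.map (fun x => x.1) tl') p.1
        simp only [List.cons_append] at hflow
        rw [hflow]
        simp [pv_short_name, pvL_user, pvL_complete, pvL_continue, pvL_start, pvL_userComplete,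
          PySem.List.pyGetD_zero_cons, PySem.List.pyGetD_neg_one, pv_last_fst,
          ← String.append_assoc]
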